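-- pv_equiv track=rewrite | github.com/sockki/algorithm-study | 배열/옹알이(2).py | solution
-- ===== SOURCE A (Python) =====
-- def solution(babbling):
--     answer = 0
--     dic = {"aya":1, "ye":1, "woo":1, "ma":1}
--
--     for bab in babbling:
--         now = ""
--         before = ""
--         for i in bab:
--             now += i
--             if now in dic:
--                 if now == before:
--                     break
--                 else:
--                     before = now
--                     now = ""
--         if now == "":
--             answer += 1
--
--     return answer
-- ===== SOURCE B (Python) =====
-- def solution(babbling):
--     tokens = ("aya", "ye", "woo", "ma")
--     answer = 0
--     for b in babbling:
--         toks = []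
--         i = 0
--         ok = True
--         while i < len(b):
--             for t in tokens:
--                 if b.startswith(t, i):
--                     toks.append(t)
--                     i += len(t)
--                     break
--             else:
--                 ok = False
--                 break
--         if ok and all(toks[j] != toks[j + 1] for j in range(len(toks) - 1)):
--             answer += 1
--     return answer
-- ===== Notes on version B (the rewrite author's own statement) =====
-- stated objective: alternative
-- what changed: Replaces A's streaming char-by-char accumulator with early break by a two-phase judge: tokenize each string with startswith jumps into a token list, then separately validate that no adjacent tokens repeat.
import Mathlib
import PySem

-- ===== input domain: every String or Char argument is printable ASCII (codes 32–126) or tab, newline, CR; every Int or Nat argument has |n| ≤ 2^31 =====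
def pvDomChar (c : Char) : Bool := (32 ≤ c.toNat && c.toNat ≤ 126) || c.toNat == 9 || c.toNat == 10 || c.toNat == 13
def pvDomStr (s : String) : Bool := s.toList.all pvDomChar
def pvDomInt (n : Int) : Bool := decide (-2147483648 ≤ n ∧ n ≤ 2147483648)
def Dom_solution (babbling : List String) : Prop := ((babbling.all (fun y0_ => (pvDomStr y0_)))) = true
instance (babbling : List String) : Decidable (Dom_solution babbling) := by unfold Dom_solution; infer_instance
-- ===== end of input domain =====

-- B tokenizes each string in one pass with startswith jumps, then validates the
-- token list (no adjacent repeats) in a second pass, instead of A's streaming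
-- char-accumulator with early break; objective: simpler/alternative, same cost.

-- ===== PORT A =====
-- the keys of A's dict {"aya":1, "ye":1, "woo":1, "ma":1}; 'now in dic' = key membership
def aTokens : List (List Char) := [['a','y','a'], ['y','e'], ['w','o','o'], ['m','a']]

-- the inner 'for i in bab' loop; returns the final value of 'now' ('break' returns it as is)
def aInner : List Char → List Char → List Char → List Char
  | [], now, _ => now
  | c :: rest, now, before =>
    let now' := now ++ [c]
    if now' ∈ aTokens then
      if now' = before then now'       -- break: 'now' stays now' (nonempty)
      else aInner rest [] now'
    else aInner rest now' before

def solution (babbling : List String) : Int :=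
  babbling.foldl (fun answer bab =>
    if aInner bab.toList [] [] = [] then answer + 1 else answer) 0

-- ===== PORT B =====
-- the while/startswith tokenizer of Source B: none = stuck ('ok = False')
def bTokenize : List Char → Option (List (List Char))
  | [] => some []
  | 'a' :: 'y' :: 'a' :: rest => (bTokenize rest).map (['a','y','a'] :: ·)
  | 'y' :: 'e' :: rest => (bTokenize rest).map (['y','e'] :: ·)
  | 'w' :: 'o' :: 'o' :: rest => (bTokenize rest).map (['w','o','o'] :: ·)
  | 'm' :: 'a' :: rest => (bTokenize rest).map (['m','a'] :: ·)
  | _ :: _ => none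

-- all(toks[j] != toks[j+1] for j in range(len(toks)-1))
def noAdj : List (List Char) → Bool
  | a :: b :: rest => decide (a ≠ b) && noAdj (b :: rest)
  | _ => true

def solution_alt (babbling : List String) : Int :=
  babbling.foldl (fun answer bab =>
    match bTokenize bab.toList with
    | some ts => if noAdj ts then answer + 1 else answer
    | none => answer) 0

-- ===== PRECONDITION & SPEC =====
def Spec_solution (babbling : List String) (out : Int) : Prop := out = solution_alt babbling
instance (babbling : List String) (out : Int) : Decidable (Spec_solution babbling out) := by unfold Spec_solution; infer_instance

-- ===== CLAIM (what is proved, stated in full; the proofs are below) =====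
def Claim_equal_solution : Prop := ∀ (babbling : List String), Dom_solution babbling → Spec_solution babbling (solution babbling)

-- ===== LEMMAS AND PROOFS =====

-- true iff the first token (if any) differs from 'before'
def headOk (before : List Char) : List (List Char) → Bool
  | [] => true
  | t :: _ => decide (t ≠ before)

lemma bTok_tokens : ∀ s ts, bTokenize s = some ts → ∀ t ∈ ts, t ∈ aTokens := by
  intro s
  induction s using bTokenize.induct with
  | case1 => intro ts h; simp [bTokenize] at h; subst h; simp
  | case2 rest ih =>
      intro ts h; simp [bTokenize] at h
      obtain ⟨ts', h', rfl⟩ := h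
      intro t ht; rcases List.mem_cons.1 ht with rfl | ht
      · simp [aTokens]
      · exact ih ts' h' t ht
  | case3 rest ih =>
      intro ts h; simp [bTokenize] at h
      obtain ⟨ts', h', rfl⟩ := h
      intro t ht; rcases List.mem_cons.1 ht with rfl | ht
      · simp [aTokens]
      · exact ih ts' h' t ht
  | case4 rest ih =>
      intro ts h; simp [bTokenize] at h
      obtain ⟨ts', h', rfl⟩ := h
      intro t ht; rcases List.mem_cons.1 ht with rfl | ht
      · simp [aTokens]
      · exact ih ts' h' t ht
  | case5 rest ih =>
      intro ts h; simp [bTokenize] at h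
      obtain ⟨ts', h', rfl⟩ := h
      intro t ht; rcases List.mem_cons.1 ht with rfl | ht
      · simp [aTokens]
      · exact ih ts' h' t ht
  | case6 => intro ts h; simp [bTokenize] at h

lemma aInner_stuck : ∀ (s now before : List Char),
    (∀ t ∈ aTokens, ∀ r, now ++ r = t → ¬ r <+: s) → aInner s now before = now ++ s := by
  intro s
  induction s with
  | nil => intro now before _; simp [aInner]
  | cons c rest ih =>
      intro now before h
      have hnm : (now ++ [c]) ∉ aTokens := by
        intro hmem
        exact h _ hmem [c] rfl ⟨rest, rfl⟩
      simp only [aInner, if_neg hnm]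
      rw [ih (now ++ [c]) before]
      · simp
      · intro t ht r hr hpre
        obtain ⟨u, rfl⟩ := hpre
        exact h t ht ([c] ++ r) (by simpa using hr) ⟨u, by simp⟩

lemma noAdj_cons (t : List Char) (ts : List (List Char)) :
    noAdj (t :: ts) = (headOk t ts && noAdj ts) := by
  cases ts with
  | nil => simp [noAdj, headOk]
  | cons b r => simp [noAdj, headOk, ne_comm]

lemma main_iff : ∀ (s : List Char) (before : List Char),
    (aInner s [] before = []) ↔
      (∃ ts, bTokenize s = some ts ∧ noAdj ts = true ∧ headOk before ts = true) := by
  intro s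
  induction s using bTokenize.induct with
  | case1 => intro before; simp [aInner, bTokenize, noAdj, headOk]
  | case2 rest ih =>
      intro before
      by_cases hb : (['a','y','a'] : List Char) = before
      · subst hb
        simp [aInner, aTokens, bTokenize, noAdj_cons, headOk]
      · have key : aInner ('a'::'y'::'a'::rest) [] before = aInner rest [] ['a','y','a'] := by
          simp [aInner, aTokens, hb]
        rw [key, ih ['a','y','a']]
        constructor
        · rintro ⟨ts', h1, h2, h3⟩
          exact ⟨['a','y','a'] :: ts', by simp [bTokenize, h1], by simp [noAdj_cons, h2, h3],
            by simp [headOk, hb]⟩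
        · rintro ⟨ts, h1, h2, h3⟩
          simp [bTokenize] at h1
          obtain ⟨ts', hts', rfl⟩ := h1
          rw [noAdj_cons, Bool.and_eq_true] at h2
          exact ⟨ts', hts', h2.2, h2.1⟩
  | case3 rest ih =>
      intro before
      by_cases hb : (['y','e'] : List Char) = before
      · subst hb
        simp [aInner, aTokens, bTokenize, noAdj_cons, headOk]
      · have key : aInner ('y'::'e'::rest) [] before = aInner rest [] ['y','e'] := by
          simp [aInner, aTokens, hb]
        rw [key, ih ['y','e']]
        constructor
        · rintro ⟨ts', h1, h2, h3⟩
          exact ⟨['y','e'] :: ts', by simp [bTokenize, h1], by simp [noAdj_cons, h2, h3],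
            by simp [headOk, hb]⟩
        · rintro ⟨ts, h1, h2, h3⟩
          simp [bTokenize] at h1
          obtain ⟨ts', hts', rfl⟩ := h1
          rw [noAdj_cons, Bool.and_eq_true] at h2
          exact ⟨ts', hts', h2.2, h2.1⟩
  | case4 rest ih =>
      intro before
      by_cases hb : (['w','o','o'] : List Char) = before
      · subst hb
        simp [aInner, aTokens, bTokenize, noAdj_cons, headOk]
      · have key : aInner ('w'::'o'::'o'::rest) [] before = aInner rest [] ['w','o','o'] := by
          simp [aInner, aTokens, hb]
        rw [key, ih ['w','o','o']]
        constructor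
        · rintro ⟨ts', h1, h2, h3⟩
          exact ⟨['w','o','o'] :: ts', by simp [bTokenize, h1], by simp [noAdj_cons, h2, h3],
            by simp [headOk, hb]⟩
        · rintro ⟨ts, h1, h2, h3⟩
          simp [bTokenize] at h1
          obtain ⟨ts', hts', rfl⟩ := h1
          rw [noAdj_cons, Bool.and_eq_true] at h2
          exact ⟨ts', hts', h2.2, h2.1⟩
  | case5 rest ih =>
      intro before
      by_cases hb : (['m','a'] : List Char) = before
      · subst hb
        simp [aInner, aTokens, bTokenize, noAdj_cons, headOk]
      · have key : aInner ('m'::'a'::rest) [] before = aInner rest [] ['m','a'] := by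
          simp [aInner, aTokens, hb]
        rw [key, ih ['m','a']]
        constructor
        · rintro ⟨ts', h1, h2, h3⟩
          exact ⟨['m','a'] :: ts', by simp [bTokenize, h1], by simp [noAdj_cons, h2, h3],
            by simp [headOk, hb]⟩
        · rintro ⟨ts, h1, h2, h3⟩
          simp [bTokenize] at h1
          obtain ⟨ts', hts', rfl⟩ := h1
          rw [noAdj_cons, Bool.and_eq_true] at h2
          exact ⟨ts', hts', h2.2, h2.1⟩
  | case6 c tail h1 h2 h3 h4 =>
      intro before
      have hnone : bTokenize (c :: tail) = none := by
        rw [bTokenize.eq_def]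
        split <;> simp_all
      have hstuck : aInner (c :: tail) [] before = c :: tail := by
        have h := aInner_stuck (c :: tail) [] before ?_
        · simpa using h
        · intro t ht r hr hpre
          simp only [List.nil_append] at hr
          subst hr
          obtain ⟨u, hu⟩ := hpre
          simp only [aTokens, List.mem_cons, List.not_mem_nil, or_false] at ht
          rcases ht with rfl | rfl | rfl | rfl <;>
            simp only [List.cons_append, List.cons.injEq, List.nil_append] at hu
          · exact h1 u hu.1.symm hu.2.symm
          · exact h2 u hu.1.symm hu.2.symm
          · exact h3 u hu.1.symm hu.2.symm
          · exact h4 u hu.1.symm hu.2.symm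
      rw [hstuck, hnone]
      simp

lemma headOk_nil (s : List Char) (ts : List (List Char)) (h : bTokenize s = some ts) :
    headOk [] ts = true := by
  cases ts with
  | nil => rfl
  | cons t ts' =>
      have ht : t ∈ aTokens := bTok_tokens s (t :: ts') h t (List.mem_cons_self)
      simp only [aTokens, List.mem_cons, List.not_mem_nil, or_false] at ht
      rcases ht with rfl | rfl | rfl | rfl <;> simp [headOk]

lemma step_eq (a : Int) (bab : String) :
    (if aInner bab.toList [] [] = [] then a + 1 else a) =
      (match bTokenize bab.toList with
        | some ts => if noAdj ts then a + 1 else a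
        | none => a) := by
  rcases h : bTokenize bab.toList with _ | ts
  · have hne : aInner bab.toList [] [] ≠ [] := by
      intro he
      rcases (main_iff bab.toList []).1 he with ⟨ts, h1, _⟩
      rw [h] at h1
      cases h1
    simp [hne]
  · by_cases hn : noAdj ts = true
    · have he : aInner bab.toList [] [] = [] :=
        (main_iff bab.toList []).2 ⟨ts, h, hn, headOk_nil bab.toList ts h⟩
      simp [he, hn]
    · have hne : aInner bab.toList [] [] ≠ [] := by
        intro he
        rcases (main_iff bab.toList []).1 he with ⟨ts', h1, h2, _⟩
        rw [h] at h1
        cases h1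
        exact hn h2
      simp [hne, hn]

-- ===== VERDICT (by name: the statement is the Claim_ definition above) =====
theorem solution_spec : Claim_equal_solution := by
  intro babbling _
  unfold Spec_solution solution solution_alt
  congr 1
  funext a bab
  exact step_eq a bab
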